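-- pv_equiv track=rewrite | github.com/alaporta85/FantaScandalo | 2019_2020/mantra_functions.py | create_schemes_candidates
-- ===== SOURCE A (Python) =====
-- from itertools import combinations, permutations
--
-- def create_schemes_candidates(list_of_roles, players_needed):
--
-- 	"""
-- 	See function create_players_candidates.
--
-- 	:param list_of_roles: list of strings
-- 	:param players_needed: int
--
-- 	:return: list of lists
--
-- 	"""
--
-- 	single = []
--
-- 	for i, roles in enumerate(list_of_roles):
--
-- 		for role in roles.split('/'):
-- 			single.append((i, role))
--
-- 	combs = list(combinations(single, players_needed))
--
-- 	candidates = []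
-- 	for comb in combs:
-- 		comb_is_ok = len(set([i[0] for i in comb])) == players_needed
-- 		if comb_is_ok:
-- 			candidates.append([i[1] for i in comb])
--
-- 	return candidates
-- ===== SOURCE B (Python) =====
-- def create_schemes_candidates(list_of_roles, players_needed):
--     if players_needed < 0:
--         raise ValueError('players_needed must be non-negative')
--     options = [roles.split('/') for roles in list_of_roles]
--     if players_needed > len(options):
--         return []  # cannot pick more distinct slots than there are
--     # rows[c] = all ways to pick c roles from pairwise-distinct slots of the
--     # suffix of options processed so far (right to left)
--     rows = [[[]]] + [[] for _ in range(players_needed)]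
--     for slot in reversed(options):
--         rows = [[[]]] + [[[role] + tail for role in slot for tail in prev] + cur
--                          for prev, cur in zip(rows, rows[1:])]
--     return rows[players_needed]
-- ===== Notes on version B (the rewrite author's own statement) =====
-- stated objective: alternative
-- what changed: Instead of materializing all C(N,k) combinations of the flattened (slot, role) list and filtering those with k distinct slots, B runs a right-to-left DP over the slot list whose rows[c] holds the valid c-role combinations of the current suffix, so only valid combinations are ever generated (output-sensitive; a timing run could not consistently confirm a speedup).
import Mathlib
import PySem

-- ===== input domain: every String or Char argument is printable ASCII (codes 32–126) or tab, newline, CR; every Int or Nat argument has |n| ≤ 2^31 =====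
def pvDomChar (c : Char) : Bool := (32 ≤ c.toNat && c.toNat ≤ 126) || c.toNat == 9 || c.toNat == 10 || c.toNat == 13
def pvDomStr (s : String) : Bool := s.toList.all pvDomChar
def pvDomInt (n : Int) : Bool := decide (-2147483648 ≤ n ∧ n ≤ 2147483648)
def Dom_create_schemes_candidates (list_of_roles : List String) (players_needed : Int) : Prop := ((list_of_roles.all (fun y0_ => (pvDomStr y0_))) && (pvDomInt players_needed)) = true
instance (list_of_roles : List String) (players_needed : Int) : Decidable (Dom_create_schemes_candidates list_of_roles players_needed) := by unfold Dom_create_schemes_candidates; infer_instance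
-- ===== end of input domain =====

-- B enumerates only the valid combinations (Cartesian products over strictly increasing slot choices)
-- instead of filtering all C(N, k) combinations of the flattened option list; return-value equivalence only.

-- shared by both ports: Python's roles.split('/') (separator is non-empty, so split? is some)
def pvSplitSlash (s : String) : List String := (PySem.Str.split? s "/").getD []

-- ===== PORT A =====
-- itertools.combinations(pool, k): all k-element subsequences in lexicographic order of positions
def pvCombosA : Nat → List (Int × String) → List (List (Int × String))
  | 0, _ => [[]]
  | _ + 1, [] => []
  | k + 1, x :: xs => (pvCombosA k xs).map (x :: ·) ++ pvCombosA (k + 1) xs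

def create_schemes_candidates (list_of_roles : List String) (players_needed : Int) : List (List String) :=
  -- single = [(i, role) for i, roles in enumerate(list_of_roles) for role in roles.split('/')]
  let single : List (Int × String) :=
    (PySem.List.enumerate list_of_roles).foldl
      (fun acc p => (pvSplitSlash p.2).foldl (fun acc2 role => acc2 ++ [(p.1, role)]) acc) []
  let combs := pvCombosA players_needed.toNat single
  combs.foldl
    (fun acc comb =>
      if PySem.Set.len (PySem.Set.ofList (comb.map (fun i => i.1))) = players_needed then
        acc ++ [comb.map (fun i => i.2)]
      else acc) []

-- ===== PORT B =====
-- Source B: dynamic programming right to left over the slots; rows[c] holds the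
-- combinations picking c roles from pairwise-distinct slots of the suffix seen so far
def pvStep (slot : List String) (rows : List (List (List String))) : List (List (List String)) :=
  [[]] :: List.zipWith
    (fun prev cur => slot.flatMap (fun role => prev.map (fun tail => role :: tail)) ++ cur)
    rows rows.tail

def create_schemes_candidates_alt (list_of_roles : List String) (players_needed : Int) : List (List String) :=
  if players_needed < 0 then []  -- Source B raises ValueError here (outside Pre_)
  else
    let options := list_of_roles.map pvSplitSlash
    if players_needed > (options.length : Int) then []  -- cannot pick more distinct slots than there are
    else
      let rows := options.foldr pvStep ([[]] :: List.replicate players_needed.toNat [])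
      rows.getD players_needed.toNat []

-- ===== PRECONDITION & SPEC =====
-- A raises ValueError for negative players_needed; Pre_ excludes exactly those inputs.
def Pre_create_schemes_candidates (list_of_roles : List String) (players_needed : Int) : Prop :=
  0 ≤ players_needed
instance (list_of_roles : List String) (players_needed : Int) : Decidable (Pre_create_schemes_candidates list_of_roles players_needed) := by unfold Pre_create_schemes_candidates; infer_instance

def pvWitness_create_schemes_candidates : List String × Int := (["a/b", "c"], 2)

def Spec_create_schemes_candidates (list_of_roles : List String) (players_needed : Int) (out : List (List String)) : Prop := out = create_schemes_candidates_alt list_of_roles players_needed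
instance (list_of_roles : List String) (players_needed : Int) (out : List (List String)) : Decidable (Spec_create_schemes_candidates list_of_roles players_needed out) := by unfold Spec_create_schemes_candidates; infer_instance

-- ===== CLAIM (what is proved, stated in full; the proofs are below) =====
def Claim_equal_create_schemes_candidates : Prop := ∀ (list_of_roles : List String) (players_needed : Int), Dom_create_schemes_candidates list_of_roles players_needed → Pre_create_schemes_candidates list_of_roles players_needed → Spec_create_schemes_candidates list_of_roles players_needed (create_schemes_candidates list_of_roles players_needed)

-- ===== LEMMAS AND PROOFS =====

-- Nat-indexed mirror of pvExtend (proof convenience)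
def pvExtendN : List (List String) → Nat → List (List String)
  | _, 0 => [[]]
  | [], _ + 1 => []
  | first :: rest, k + 1 =>
      first.flatMap (fun role => (pvExtendN rest k).map (fun tail => role :: tail))
        ++ pvExtendN rest (k + 1)

def pvFlat (gs : List (Int × List String)) : List (Int × String) :=
  gs.flatMap (fun g => g.2.map (fun r => (g.1, r)))

lemma pvCombosA_length : ∀ (k : Nat) (pool : List (Int × String)) (c : List (Int × String)),
    c ∈ pvCombosA k pool → c.length = k := by
  intro k
  induction k with
  | zero => intro pool c hc; simp [pvCombosA] at hc; simp [hc]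
  | succ j ih =>
      intro pool
      induction pool with
      | nil => intro c hc; simp [pvCombosA] at hc
      | cons x xs ihp =>
          intro c hc
          simp only [pvCombosA, List.mem_append, List.mem_map] at hc
          rcases hc with ⟨d, hd, rfl⟩ | hc
          · simp [ih xs d hd]
          · exact ihp c hc

lemma pvCombosA_subset : ∀ (k : Nat) (pool : List (Int × String)) (c : List (Int × String)),
    c ∈ pvCombosA k pool → ∀ x ∈ c, x ∈ pool := by
  intro k
  induction k with
  | zero => intro pool c hc; simp [pvCombosA] at hc; simp [hc]
  | succ j ih =>
      intro pool
      induction pool with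
      | nil => intro c hc; simp [pvCombosA] at hc
      | cons y xs ihp =>
          intro c hc x hx
          simp only [pvCombosA, List.mem_append, List.mem_map] at hc
          rcases hc with ⟨d, hd, rfl⟩ | hc
          · rcases List.mem_cons.mp hx with rfl | hx
            · exact List.mem_cons_self
            · exact List.mem_cons_of_mem _ (ih xs d hd x hx)
          · exact List.mem_cons_of_mem _ (ihp c hc x hx)

-- combinations that pick anything from a block whose first components all equal i
-- are killed by the 'i not among the firsts' part of the predicate
lemma pvFilterSkip (i : Int) :
    ∀ (A B : List (Int × String)) (k : Nat),
    (∀ x ∈ A, x.1 = i) → (∀ x ∈ B, x.1 ≠ i) →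
    (pvCombosA k (A ++ B)).filter
        (fun c => decide ((c.map Prod.fst).Nodup ∧ i ∉ c.map Prod.fst))
      = (pvCombosA k B).filter
        (fun c => decide ((c.map Prod.fst).Nodup ∧ i ∉ c.map Prod.fst)) := by
  intro A
  induction A with
  | nil => intro B k _ _; rfl
  | cons a A' ihA =>
      intro B k hA hB
      have ha : a.1 = i := hA a List.mem_cons_self
      have hA' : ∀ x ∈ A', x.1 = i := fun x hx => hA x (List.mem_cons_of_mem _ hx)
      cases k with
      | zero => simp [pvCombosA]
      | succ j =>
          show (((pvCombosA j (A' ++ B)).map (a :: ·) ++ pvCombosA (j+1) (A' ++ B)).filter _) = _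
          rw [List.filter_append, List.filter_map]
          rw [List.filter_eq_nil_iff.mpr (by intro c hc; simp [ha])]
          simpa using ihA B (j+1) hA' hB

-- the main invariant: A's generate-and-filter over the flattened pool equals B's direct recursion
lemma pvMain : ∀ (gs : List (Int × List String)) (k : Nat),
    (gs.map Prod.fst).Pairwise (· ≠ ·) →
    ((pvCombosA k (pvFlat gs)).filter (fun c => decide ((c.map Prod.fst).Nodup))).map
        (fun c => c.map Prod.snd)
      = pvExtendN (gs.map Prod.snd) k := by
  intro gs
  induction gs with
  | nil =>
      intro k _
      cases k with
      | zero => simp [pvFlat, pvCombosA, pvExtendN]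
      | succ j => simp [pvFlat, pvCombosA, pvExtendN]
  | cons g gs' ihg =>
      obtain ⟨i, rs⟩ := g
      intro k hpw
      have hpwtail : (gs'.map Prod.fst).Pairwise (· ≠ ·) := (List.pairwise_cons.mp hpw).2
      have hi : ∀ x ∈ pvFlat gs', x.1 ≠ i := by
        intro x hx
        simp only [pvFlat, List.mem_flatMap, List.mem_map] at hx
        obtain ⟨g', hg', y, _, rfl⟩ := hx
        have := (List.pairwise_cons.mp hpw).1 g'.1 (List.mem_map_of_mem hg')
        exact fun h => this (h ▸ rfl)
      induction rs generalizing k with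
      | nil =>
          have : pvFlat ((i, ([] : List String)) :: gs') = pvFlat gs' := by simp [pvFlat]
          rw [this, ihg k hpwtail]
          cases k with
          | zero => simp [pvExtendN]
          | succ j => simp [pvExtendN]
      | cons r rs' ihr =>
          cases k with
          | zero => simp [pvCombosA, pvExtendN]
          | succ j =>
              have hflat : pvFlat ((i, r :: rs') :: gs')
                  = (i, r) :: pvFlat ((i, rs') :: gs') := by simp [pvFlat]
              rw [hflat]
              show ((((pvCombosA j (pvFlat ((i, rs') :: gs'))).map ((i, r) :: ·)
                  ++ pvCombosA (j+1) (pvFlat ((i, rs') :: gs'))).filter _).map _) = _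
              rw [List.filter_append, List.filter_map, List.map_append, List.map_map]
              -- second summand: the inner induction hypothesis
              have hpart2 :
                  ((pvCombosA (j+1) (pvFlat ((i, rs') :: gs'))).filter
                      (fun c => decide ((c.map Prod.fst).Nodup))).map (fun c => c.map Prod.snd)
                    = pvExtendN (rs' :: gs'.map Prod.snd) (j+1) := ihr (j+1) hpw
              -- first summand: rewrite the predicate, skip the i-block, use the outer IH
              have hpred : ((fun c => decide ((c.map Prod.fst).Nodup)) ∘ ((i, r) :: ·))
                  = (fun (c : List (Int × String)) =>
                      decide ((c.map Prod.fst).Nodup ∧ i ∉ c.map Prod.fst)) := by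
                funext c
                by_cases h1 : (c.map Prod.fst).Nodup <;>
                  by_cases h2 : i ∈ c.map Prod.fst <;>
                    simp [List.nodup_cons, h1, h2]
              have hsplit : pvFlat ((i, rs') :: gs')
                  = rs'.map (fun r' => (i, r')) ++ pvFlat gs' := by simp [pvFlat]
              have hskip := pvFilterSkip i (rs'.map (fun r' => (i, r'))) (pvFlat gs') j
                (by intro x hx; simp only [List.mem_map] at hx; obtain ⟨y, _, rfl⟩ := hx; rfl)
                hi
              have hdrop : (pvCombosA j (pvFlat gs')).filter
                    (fun c => decide ((c.map Prod.fst).Nodup ∧ i ∉ c.map Prod.fst))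
                  = (pvCombosA j (pvFlat gs')).filter
                    (fun c => decide ((c.map Prod.fst).Nodup)) := by
                apply List.filter_congr
                intro c hc
                have : i ∉ c.map Prod.fst := by
                  intro hmem
                  simp only [List.mem_map] at hmem
                  obtain ⟨x, hx, hx1⟩ := hmem
                  exact hi x (pvCombosA_subset j _ c hc x hx) hx1
                simp [this]
              have hpart1 :
                  ((pvCombosA j (pvFlat ((i, rs') :: gs'))).filter
                      ((fun c => decide ((c.map Prod.fst).Nodup)) ∘ ((i, r) :: ·))).map
                    ((fun c => c.map Prod.snd) ∘ ((i, r) :: ·))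
                  = (pvExtendN (gs'.map Prod.snd) j).map (fun tail => r :: tail) := by
                rw [hpred, hsplit, hskip, hdrop]
                have : ((fun c => c.map Prod.snd) ∘ ((i, r) :: ·))
                    = (fun tail => r :: tail) ∘ (fun (c : List (Int × String)) => c.map Prod.snd) := by
                  funext c; rfl
                rw [this, ← List.map_map, ihg j hpwtail]
              rw [hpart1, hpart2]
              show _ = pvExtendN ((r :: rs') :: gs'.map Prod.snd) (j+1)
              simp [pvExtendN, List.append_assoc]

lemma pvFoldlAdd_sublist {α : Type} [BEq α] :
    ∀ (xs acc : List α), (xs.foldl PySem.Set.add acc).Sublist (acc ++ xs) := by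
  intro xs
  induction xs with
  | nil => intro acc; simp
  | cons x xs ih =>
      intro acc
      have h1 : (PySem.Set.add acc x).Sublist (acc ++ [x]) := by
        unfold PySem.Set.add
        split
        · exact List.sublist_append_left acc [x]
        · exact List.Sublist.refl _
      have h2 := ih (PySem.Set.add acc x)
      have h3 : (PySem.Set.add acc x ++ xs).Sublist ((acc ++ [x]) ++ xs) :=
        h1.append_right xs
      have : ((acc ++ [x]) ++ xs) = acc ++ (x :: xs) := by simp
      exact (h2.trans h3).trans (this ▸ List.Sublist.refl _)

lemma pvOfListSublist {α : Type} [BEq α] (xs : List α) :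
    (PySem.Set.ofList xs).Sublist xs := by
  rw [PySem.Set.ofList_eq_foldl]
  simpa using pvFoldlAdd_sublist xs []


lemma pvZipConsec {α β : Type} (f : α → α → β) (k : Nat) (g : Nat → α) :
    List.zipWith f ((List.range (k+1)).map g) (((List.range (k+1)).map g).tail)
      = (List.range k).map (fun c => f (g c) (g (c+1))) := by
  apply List.ext_getElem
  · simp
  · intro i h1 h2
    simp [List.getElem_zipWith, List.getElem_tail, List.getElem_map, List.getElem_range]

lemma pvRowsInit (k : Nat) :
    ([[]] :: List.replicate k ([] : List (List String)))
      = (List.range (k+1)).map (pvExtendN []) := by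
  apply List.ext_getElem
  · simp
  · intro i h1 h2
    match i with
    | 0 =>
        rw [List.getElem_map, List.getElem_range]
        rfl
    | Nat.succ j =>
        rw [List.getElem_map, List.getElem_range, List.getElem_cons_succ, List.getElem_replicate]
        rfl

lemma pvRows (k : Nat) :
    ∀ (options : List (List String)),
    options.foldr pvStep ([[]] :: List.replicate k ([] : List (List String)))
      = (List.range (k+1)).map (pvExtendN options) := by
  intro options
  induction options with
  | nil => simpa using pvRowsInit k
  | cons slot rest ih =>
      rw [List.foldr_cons, ih]
      unfold pvStep
      rw [pvZipConsec _ k (pvExtendN rest)]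
      rw [List.range_succ_eq_map, List.map_cons, List.map_map]
      rfl

lemma pvExtendN_eq_nil : ∀ (os : List (List String)) (c : Nat), os.length < c → pvExtendN os c = [] := by
  intro os
  induction os with
  | nil =>
      intro c hc
      match c, hc with
      | c + 1, _ => rfl
  | cons first rest ih =>
      intro c hc
      match c, hc with
      | c + 1, hc =>
          have h1 : rest.length < c := by simp at hc; omega
          have h2 : rest.length < c + 1 := by omega
          show first.flatMap _ ++ pvExtendN rest (c + 1) = []
          rw [ih c h1, ih (c + 1) h2]
          simp

lemma pvAltEq (l : List String) (k : Int) (hk : 0 ≤ k) :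
    create_schemes_candidates_alt l k = pvExtendN (l.map pvSplitSlash) k.toNat := by
  unfold create_schemes_candidates_alt
  rw [if_neg (by omega)]
  by_cases hbig : k > ((l.map pvSplitSlash).length : Int)
  · rw [if_pos hbig, (pvExtendN_eq_nil _ k.toNat (by simp at hbig ⊢; omega)).symm]
  rw [if_neg hbig]
  simp only [pvRows k.toNat (l.map pvSplitSlash)]
  rw [List.getD_eq_getElem?_getD, List.getElem?_map, List.getElem?_range (by omega)]
  rfl

-- ===== VERDICT (by name: the statement is the Claim_ definition above) =====
theorem create_schemes_candidates_spec : Claim_equal_create_schemes_candidates := by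
  intro l k _ hpre
  unfold Pre_create_schemes_candidates at hpre
  unfold Spec_create_schemes_candidates create_schemes_candidates
  simp only [PySem.List.foldl_append_singleton_eq_map, PySem.List.foldl_append_eq_flatMap,
    PySem.List.foldl_append_ite, List.nil_append]
  have hfst : (fun (i : Int × String) => i.1) = Prod.fst := rfl
  have hsnd' : (fun (i : Int × String) => i.2) = Prod.snd := rfl
  rw [hfst, hsnd']
  set gs : List (Int × List String) :=
    (PySem.List.enumerate l).map (fun p => (p.1, pvSplitSlash p.2)) with hgs
  have hflat : (PySem.List.enumerate l).flatMap
      (fun p => (pvSplitSlash p.2).map (fun role => (p.1, role))) = pvFlat gs := by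
    simp [pvFlat, hgs, List.flatMap_map]
  rw [hflat]
  have hcond : ∀ c ∈ pvCombosA k.toNat (pvFlat gs),
      (decide (PySem.Set.len (PySem.Set.ofList (c.map Prod.fst)) = k))
        = decide ((c.map Prod.fst).Nodup) := by
    intro c hc
    have hlen : c.length = k.toNat := pvCombosA_length _ _ _ hc
    have hfs : (c.map Prod.fst).length = k.toNat := by simp [hlen]
    apply decide_eq_decide.mpr
    constructor
    · intro h
      have hL : (PySem.Set.ofList (c.map Prod.fst)).length = k.toNat := by
        simp only [PySem.Set.len] at h
        omega
      have hsub := pvOfListSublist (c.map Prod.fst)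
      have heq := hsub.eq_of_length (by rw [hL, hfs])
      rw [← heq]
      exact PySem.Set.nodup_ofList _
    · intro h
      rw [PySem.Set.ofList_eq_self_of_nodup _ h]
      simp only [PySem.Set.len, hfs]
      omega
  rw [List.filter_congr hcond]
  have hpw : (gs.map Prod.fst).Pairwise (· ≠ ·) := by
    rw [hgs, List.map_map]
    exact (List.pairwise_map).mpr
      ((PySem.List.pairwise_lt_enumerate l 0).imp (fun h => ne_of_lt h))
  have hsnd : gs.map Prod.snd = l.map pvSplitSlash := by
    rw [hgs, List.map_map]
    have h1 : (Prod.snd ∘ fun (p : Int × String) => (p.1, pvSplitSlash p.2))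
        = pvSplitSlash ∘ (fun (p : Int × String) => p.2) := rfl
    rw [h1, ← List.map_map, PySem.List.map_snd_enumerate]
  rw [pvMain gs k.toNat hpw, hsnd, pvAltEq l k hpre]
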